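-- pv_equiv track=rewrite | github.com/martiny999/yoctotools | oe-packages-depends.py | find_dependency_chain
-- ===== SOURCE A (Python) =====
-- def find_dependency_chain(package, dependencies, visited=None):
--     if visited is None:
--         visited = set()
--
--     # 如果该 package 已经访问过，直接返回
--     if package in visited:
--         return []
--
--     visited.add(package)
--
--     # 创建依赖链
--     chain = [package]
--
--     # 检查依赖
--     if package in dependencies:
--         for dep in dependencies[package]:
--             chain.extend(find_dependency_chain(dep, dependencies, visited))
--
--     return chain
-- ===== SOURCE B (Python) =====
-- def find_dependency_chain(package, dependencies, visited=None):
--     if visited is None: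
--         visited = set()
--     chain = []
--     stack = [package]
--     while stack:
--         p = stack.pop()
--         if p in visited:
--             continue
--         visited.add(p)
--         chain.append(p)
--         if p in dependencies:
--             stack.extend(reversed(dependencies[p]))
--     return chain
-- ===== Notes on version B (the rewrite author's own statement) =====
-- stated objective: idiomatic
-- what changed: Replaced the recursive preorder DFS (recursion through a shared mutable visited set, building the chain by extending per-call lists) with an iterative DFS using an explicit stack: pop a node, skip if visited, else mark, append to one chain list, and push its dependencies in reversed order.
import Mathlib
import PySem

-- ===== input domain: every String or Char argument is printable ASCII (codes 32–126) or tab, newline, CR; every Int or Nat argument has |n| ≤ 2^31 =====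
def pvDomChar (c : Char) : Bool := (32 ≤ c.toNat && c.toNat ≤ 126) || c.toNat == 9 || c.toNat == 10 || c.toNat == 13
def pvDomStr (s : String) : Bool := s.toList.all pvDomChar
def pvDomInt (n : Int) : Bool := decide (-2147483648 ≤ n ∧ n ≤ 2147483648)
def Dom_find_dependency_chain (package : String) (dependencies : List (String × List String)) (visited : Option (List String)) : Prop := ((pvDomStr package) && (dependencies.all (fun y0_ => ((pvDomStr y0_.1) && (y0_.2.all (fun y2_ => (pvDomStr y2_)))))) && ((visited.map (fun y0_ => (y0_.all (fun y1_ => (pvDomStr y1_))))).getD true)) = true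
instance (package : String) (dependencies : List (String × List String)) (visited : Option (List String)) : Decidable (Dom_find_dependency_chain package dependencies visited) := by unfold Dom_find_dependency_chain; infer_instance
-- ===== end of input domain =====

-- B replaces A's recursive DFS by an iterative explicit-stack DFS (idiomatic, no recursion); same
-- return value and the same final visited-set contents — the equivalence proved here is about the
-- return value (Python A and B both mutate the visited argument, with identical final contents).

-- ===== PORT A =====
-- Fuel bound used by both ports purely as a totality guard (proved sufficient below):
-- 1 + sum over all dependency entries of (1 + length of its list).
def pvFuel (deps : List (String × List String)) : Nat :=
  (deps.map (fun e => 1 + e.2.length)).sum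

-- State-passing transliteration of A's recursion: the shared mutable `visited` set is threaded
-- through and returned; `Sum.inl p` is a call `find_dependency_chain(p, …)`, `Sum.inr ds` is the
-- `for dep in ds: chain.extend(…)` loop.  `none` = fuel ran out (never happens at fuel pvFuel+1).
def goA (deps : List (String × List String)) :
    Nat → String ⊕ List String → PySem.Set String → Option (List String × PySem.Set String)
  | _, Sum.inr [], vis => some ([], vis)
  | f, Sum.inr (d :: ds), vis =>
    match goA deps f (Sum.inl d) vis with
    | none => none
    | some (c, v) =>
      match goA deps f (Sum.inr ds) v with
      | none => none
      | some (cs, v') => some (c ++ cs, v')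
  | 0, Sum.inl _, _ => none
  | f + 1, Sum.inl p, vis =>
    if PySem.Set.contains vis p then some ([], vis)       -- if package in visited: return []
    else
      match deps.lookup p with                            -- if package in dependencies:
      | none => some ([p], PySem.Set.add vis p)
      | some ds =>
        match goA deps f (Sum.inr ds) (PySem.Set.add vis p) with
        | none => none
        | some (cs, v) => some (p :: cs, v)
termination_by f x _ => (f, match x with | Sum.inl _ => 0 | Sum.inr ds => ds.length + 1)
decreasing_by all_goals simp_all; omega

def find_dependency_chain (package : String) (dependencies : List (String × List String)) (visited : Option (List String)) : List String :=
  match goA dependencies (1 + pvFuel dependencies) (Sum.inl package) (PySem.Set.ofList (visited.getD [])) with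
  | some (c, _) => c
  | none => []

-- ===== PORT B =====
-- Iterative DFS with an explicit stack, modeled top-first (Python pops from the END of the list and
-- pushes reversed(deps[p]), so the Lean list is the reversed Python stack: pushing reversed(ds) onto
-- the end is `ds ++ rest` at the head).  `none` = fuel ran out (never happens at fuel pvFuel+1).
def goB (deps : List (String × List String)) :
    Nat → List String → PySem.Set String → List String → Option (List String)
  | _, [], _, chain => some chain                          -- while stack: … ; return chain
  | 0, _ :: _, _, _ => none
  | f + 1, p :: rest, vis, chain =>
    if PySem.Set.contains vis p then goB deps f rest vis chain   -- if p in visited: continue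
    else
      match deps.lookup p with
      | none => goB deps f rest (PySem.Set.add vis p) (chain ++ [p])
      | some ds => goB deps f (ds ++ rest) (PySem.Set.add vis p) (chain ++ [p])

def find_dependency_chain_alt (package : String) (dependencies : List (String × List String)) (visited : Option (List String)) : List String :=
  match goB dependencies (1 + pvFuel dependencies) [package] (PySem.Set.ofList (visited.getD [])) [] with
  | some chain => chain
  | none => []

-- ===== PRECONDITION & SPEC =====
def Spec_find_dependency_chain (package : String) (dependencies : List (String × List String)) (visited : Option (List String)) (out : List String) : Prop := out = find_dependency_chain_alt package dependencies visited
instance (package : String) (dependencies : List (String × List String)) (visited : Option (List String)) (out : List String) : Decidable (Spec_find_dependency_chain package dependencies visited out) := by unfold Spec_find_dependency_chain; infer_instance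

-- ===== CLAIM (what is proved, stated in full; the proofs are below) =====
def Claim_equal_find_dependency_chain : Prop := ∀ (package : String) (dependencies : List (String × List String)) (visited : Option (List String)), Dom_find_dependency_chain package dependencies visited → Spec_find_dependency_chain package dependencies visited (find_dependency_chain package dependencies visited)

-- ===== LEMMAS AND PROOFS =====

-- Weight of the still-unvisited dependency entries; it bounds both the recursion depth of goA and
-- the number of loop iterations of goB.
def pvW (deps : List (String × List String)) (vis : PySem.Set String) : Nat :=
  (deps.map (fun e => if e.1 ∈ vis then 0 else 1 + e.2.length)).sum

theorem pvW_le_fuel (deps : List (String × List String)) (vis : PySem.Set String) :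
    pvW deps vis ≤ pvFuel deps := by
  induction deps with
  | nil => simp [pvW, pvFuel]
  | cons e es ih =>
    simp only [pvW, pvFuel, List.map_cons, List.sum_cons] at *
    split_ifs <;> omega

theorem pvW_antitone (deps : List (String × List String)) {vis vis' : PySem.Set String}
    (h : ∀ x, x ∈ vis → x ∈ vis') : pvW deps vis' ≤ pvW deps vis := by
  induction deps with
  | nil => simp [pvW]
  | cons e es ih =>
    obtain ⟨q, l⟩ := e
    simp only [pvW, List.map_cons, List.sum_cons] at *
    by_cases hq : q ∈ vis'
    · rw [if_pos hq]
      split_ifs <;> omega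
    · have hqv : q ∉ vis := fun hx => hq (h _ hx)
      rw [if_neg hq, if_neg hqv]
      omega

theorem pvW_sub_add (deps : List (String × List String)) (vis : PySem.Set String) (p : String) :
    pvW deps (PySem.Set.add vis p) ≤ pvW deps vis :=
  pvW_antitone deps (fun x hx => by rw [PySem.Set.mem_add]; left; exact hx)

theorem pvW_key {deps : List (String × List String)} {p : String} {ds : List String}
    {vis : PySem.Set String} (hl : deps.lookup p = some ds) (hp : p ∉ vis) :
    1 + ds.length + pvW deps (PySem.Set.add vis p) ≤ pvW deps vis := by
  induction deps with
  | nil => simp [List.lookup] at hl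
  | cons e es ih =>
    obtain ⟨q, l⟩ := e
    simp only [pvW, List.map_cons, List.sum_cons]
    by_cases he : q = p
    · have hb : (p == q) = true := by simp [he]
      simp [List.lookup, hb] at hl
      obtain rfl := hl
      have h1 : q ∈ PySem.Set.add vis p := by rw [PySem.Set.mem_add]; right; exact he
      have h2 : q ∉ vis := fun hx => hp (he ▸ hx)
      rw [if_pos h1, if_neg h2]
      have h3 := pvW_sub_add es vis p
      simp only [pvW] at h3
      omega
    · have hb : (p == q) = false := by simp; exact fun hh => he hh.symm
      simp [List.lookup, hb] at hl
      have h1 : (q ∈ PySem.Set.add vis p) ↔ (q ∈ vis) := by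
        rw [PySem.Set.mem_add]
        constructor
        · rintro (hh | hh)
          · exact hh
          · exact absurd hh he
        · exact Or.inl
      have h2 := ih hl
      simp only [pvW] at h2
      by_cases hq : q ∈ vis
      · rw [if_pos hq, if_pos (h1.mpr hq)]
        omega
      · rw [if_neg hq, if_neg (fun hh => hq (h1.mp hh))]
        omega

-- Visited only grows through goA.
theorem goA_grow (deps : List (String × List String)) (f : Nat) (x : String ⊕ List String)
    (vis : PySem.Set String) :
    ∀ c v, goA deps f x vis = some (c, v) → ∀ y ∈ vis, y ∈ v := by
  induction f, x, vis using goA.induct deps with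
  | case1 f vis =>
    intro c v h y hy
    simp [goA] at h
    obtain ⟨rfl, rfl⟩ := h
    exact hy
  | case2 f d ds vis heq ih1 =>
    intro c v h
    simp [goA, heq] at h
  | case3 f d ds vis cs v' heq1 heq2 ih1 ih2 =>
    intro c v h
    simp [goA, heq1, heq2] at h
  | case4 f d ds vis cs v' heq1 cs2 v2 heq2 ih1 ih2 =>
    intro c v h y hy
    simp [goA, heq1, heq2] at h
    obtain ⟨rfl, rfl⟩ := h
    exact ih2 _ _ heq2 y (ih1 _ _ heq1 y hy)
  | case5 p vis =>
    intro c v h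
    simp [goA] at h
  | case6 f p vis hmem =>
    intro c v h y hy
    have hpm : p ∈ vis := (PySem.Set.contains_iff vis p).mp hmem
    simp [goA, hpm] at h
    obtain ⟨rfl, rfl⟩ := h
    exact hy
  | case7 f p vis hmem hl =>
    intro c v h y hy
    have hp : p ∉ vis := fun hin => hmem ((PySem.Set.contains_iff vis p).mpr hin)
    have hadd : PySem.Set.add vis p = vis ++ [p] := PySem.Set.add_of_not_mem hp
    simp [goA, hp, hl] at h
    obtain ⟨rfl, rfl⟩ := h
    exact List.mem_append.mpr (Or.inl hy)
  | case8 f p vis hmem ds hl heq ih =>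
    intro c v h
    have hp : p ∉ vis := fun hin => hmem ((PySem.Set.contains_iff vis p).mpr hin)
    have hadd : PySem.Set.add vis p = vis ++ [p] := PySem.Set.add_of_not_mem hp
    rw [hadd] at heq
    simp [goA, hp, hl, heq] at h
  | case9 f p vis hmem ds hl cs v' heq ih =>
    intro c v h y hy
    have hp : p ∉ vis := fun hin => hmem ((PySem.Set.contains_iff vis p).mpr hin)
    have hadd : PySem.Set.add vis p = vis ++ [p] := PySem.Set.add_of_not_mem hp
    rw [hadd] at heq ih
    simp [goA, hp, hl, heq] at h
    obtain ⟨rfl, rfl⟩ := h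
    exact ih _ _ heq y (List.mem_append.mpr (Or.inl hy))

-- Sufficient fuel: with fuel at least 1 + pvW, goA returns a value.
theorem goA_suff (deps : List (String × List String)) (f : Nat) (x : String ⊕ List String)
    (vis : PySem.Set String) :
    1 + pvW deps vis ≤ f → ∃ c v, goA deps f x vis = some (c, v) := by
  induction f, x, vis using goA.induct deps with
  | case1 f vis => exact fun _ => ⟨[], vis, by simp [goA]⟩
  | case2 f d ds vis heq ih1 =>
    intro hf
    obtain ⟨c, v, h1⟩ := ih1 hf
    rw [heq] at h1
    exact absurd h1 (by simp)
  | case3 f d ds vis cs v' heq1 heq2 ih1 ih2 =>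
    intro hf
    have hg := goA_grow deps f (Sum.inl d) vis cs v' heq1
    have hv : 1 + pvW deps v' ≤ f := le_trans (by have := pvW_antitone deps hg; omega) hf
    obtain ⟨c, v, h2⟩ := ih2 hv
    rw [heq2] at h2
    exact absurd h2 (by simp)
  | case4 f d ds vis cs v' heq1 cs2 v2 heq2 ih1 ih2 =>
    exact fun _ => ⟨cs ++ cs2, v2, by simp [goA, heq1, heq2]⟩
  | case5 p vis =>
    intro hf
    omega
  | case6 f p vis hmem =>
    refine fun _ => ⟨[], vis, ?_⟩
    have hpm : p ∈ vis := (PySem.Set.contains_iff vis p).mp hmem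
    simp [goA, hpm]
  | case7 f p vis hmem hl =>
    refine fun _ => ⟨[p], PySem.Set.add vis p, ?_⟩
    have hp : p ∉ vis := fun hin => hmem ((PySem.Set.contains_iff vis p).mpr hin)
    simp [goA, hp, hl]
  | case8 f p vis hmem ds hl heq ih =>
    intro hf
    have hp : p ∉ vis := fun hin => hmem ((PySem.Set.contains_iff vis p).mpr hin)
    have hkey := pvW_key hl hp
    obtain ⟨c, v, h1⟩ := ih (by omega)
    rw [heq] at h1
    exact absurd h1 (by simp)
  | case9 f p vis hmem ds hl cs v' heq ih =>
    refine fun _ => ⟨p :: cs, v', ?_⟩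
    have hp : p ∉ vis := fun hin => hmem ((PySem.Set.contains_iff vis p).mpr hin)
    have hadd : PySem.Set.add vis p = vis ++ [p] := PySem.Set.add_of_not_mem hp
    rw [hadd] at heq
    simp [goA, hp, hl, heq]

-- Simulation: one goA call (a node, or a list of nodes) equals k iterations of goB's loop, for a
-- k bounded by the weight it consumes, and for EVERY remaining fuel fb.
theorem goA_sim (deps : List (String × List String)) (f : Nat) (x : String ⊕ List String)
    (vis : PySem.Set String) :
    ∀ c v, goA deps f x vis = some (c, v) →
    ∀ rest chain, ∃ k,
      k + pvW deps v ≤ (match x with | Sum.inl _ => 1 | Sum.inr ds => ds.length) + pvW deps vis ∧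
      ∀ fb, goB deps (k + fb) ((match x with | Sum.inl p => [p] | Sum.inr ds => ds) ++ rest) vis chain
            = goB deps fb rest v (chain ++ c) := by
  induction f, x, vis using goA.induct deps with
  | case1 f vis =>
    intro c v h rest chain
    simp [goA] at h
    obtain ⟨rfl, rfl⟩ := h
    exact ⟨0, by simp, fun fb => by simp⟩
  | case2 f d ds vis heq ih1 =>
    intro c v h
    simp [goA, heq] at h
  | case3 f d ds vis cs v' heq1 heq2 ih1 ih2 =>
    intro c v h
    simp [goA, heq1, heq2] at h
  | case4 f d ds vis cs v' heq1 cs2 v2 heq2 ih1 ih2 =>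
    intro c v h rest chain
    simp [goA, heq1, heq2] at h
    obtain ⟨rfl, rfl⟩ := h
    obtain ⟨k1, hb1, hs1⟩ := ih1 _ _ heq1 (ds ++ rest) chain
    obtain ⟨k2, hb2, hs2⟩ := ih2 _ _ heq2 rest (chain ++ cs)
    refine ⟨k1 + k2, by simp at hb1 hb2 ⊢; omega, fun fb => ?_⟩
    have e1 := hs1 (k2 + fb)
    have e2 := hs2 fb
    simp only [List.singleton_append] at e1
    show goB deps (k1 + k2 + fb) (d :: (ds ++ rest)) _ chain = _
    rw [show k1 + k2 + fb = k1 + (k2 + fb) by omega, e1, e2, List.append_assoc]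
  | case5 p vis =>
    intro c v h
    simp [goA] at h
  | case6 f p vis hmem =>
    intro c v h rest chain
    have hpm : p ∈ vis := (PySem.Set.contains_iff vis p).mp hmem
    simp [goA, hpm] at h
    obtain ⟨rfl, rfl⟩ := h
    refine ⟨1, by simp, fun fb => ?_⟩
    show goB deps (1 + fb) (p :: rest) vis chain = _
    rw [show 1 + fb = fb + 1 by omega]
    simp [goB, hpm]
  | case7 f p vis hmem hl =>
    intro c v h rest chain
    have hp : p ∉ vis := fun hin => hmem ((PySem.Set.contains_iff vis p).mpr hin)
    have hadd : PySem.Set.add vis p = vis ++ [p] := PySem.Set.add_of_not_mem hp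
    simp [goA, hp, hl] at h
    obtain ⟨rfl, rfl⟩ := h
    refine ⟨1, ?_, fun fb => ?_⟩
    · have h3 := pvW_sub_add deps vis p
      rw [hadd] at h3
      simp
      omega
    · show goB deps (1 + fb) (p :: rest) vis chain = _
      rw [show 1 + fb = fb + 1 by omega]
      simp [goB, hp, hl]
  | case8 f p vis hmem ds hl heq ih =>
    intro c v h
    have hp : p ∉ vis := fun hin => hmem ((PySem.Set.contains_iff vis p).mpr hin)
    have hadd : PySem.Set.add vis p = vis ++ [p] := PySem.Set.add_of_not_mem hp
    rw [hadd] at heq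
    simp [goA, hp, hl, heq] at h
  | case9 f p vis hmem ds hl cs v' heq ih =>
    intro c v h rest chain
    have hp : p ∉ vis := fun hin => hmem ((PySem.Set.contains_iff vis p).mpr hin)
    have hadd : PySem.Set.add vis p = vis ++ [p] := PySem.Set.add_of_not_mem hp
    have hkey := pvW_key hl hp
    rw [hadd] at heq ih hkey
    simp [goA, hp, hl, heq] at h
    obtain ⟨rfl, rfl⟩ := h
    obtain ⟨k', hb, hs⟩ := ih _ _ heq rest (chain ++ [p])
    refine ⟨1 + k', by simp at hb hkey ⊢; omega, fun fb => ?_⟩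
    have e : goB deps (k' + fb) (ds ++ rest) (vis ++ [p]) (chain ++ [p])
        = goB deps fb rest v' (chain ++ [p] ++ cs) := hs fb
    show goB deps (1 + k' + fb) (p :: rest) vis chain = _
    rw [show 1 + k' + fb = (k' + fb) + 1 by omega]
    simp only [goB]
    rw [if_neg hmem, hl, hadd]
    show goB deps (k' + fb) (ds ++ rest) (vis ++ [p]) (chain ++ [p]) = _
    rw [e]
    simp

-- ===== VERDICT (by name: the statement is the Claim_ definition above) =====
theorem find_dependency_chain_spec : Claim_equal_find_dependency_chain := by
  unfold Claim_equal_find_dependency_chain Spec_find_dependency_chain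
  intro package deps visited _
  obtain ⟨c, v, hA⟩ :=
    goA_suff deps (1 + pvFuel deps) (Sum.inl package) (PySem.Set.ofList (visited.getD []))
      (by have := pvW_le_fuel deps (PySem.Set.ofList (visited.getD [])); omega)
  obtain ⟨k, hk, hsim⟩ := goA_sim deps _ _ _ c v hA [] []
  have hle : k ≤ 1 + pvFuel deps := by
    have := pvW_le_fuel deps (PySem.Set.ofList (visited.getD []))
    simp at hk
    omega
  have hB : goB deps (1 + pvFuel deps) [package] (PySem.Set.ofList (visited.getD [])) [] = some c := by
    have e := hsim (1 + pvFuel deps - k)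
    rw [show k + (1 + pvFuel deps - k) = 1 + pvFuel deps by omega] at e
    simpa [goB] using e
  unfold find_dependency_chain find_dependency_chain_alt
  rw [hA, hB]
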